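-- pv_equiv track=rewrite | github.com/sajor2000/railway_code_app | backend/services/csv_analyzer.py | _looks_like_medical_concept
-- ===== SOURCE A (Python) =====
-- def _looks_like_medical_concept(value: str) -> bool:
--     """Check if a value looks like a medical concept"""
--     value = str(value).strip().lower()
--
--     # Skip empty, numeric, or very short values
--     if not value or len(value) < 3 or value.isdigit():
--         return False
--
--     # Common medical terms
--     medical_terms = [
--         'diabetes', 'hypertension', 'pneumonia', 'sepsis', 'infection',
--         'syndrome', 'disease', 'disorder', 'condition', 'mg', 'ml',
--         'positive', 'negative', 'normal', 'abnormal', 'surgery', 'biopsy'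
--     ]
--
--     return any(term in value for term in medical_terms)
-- ===== SOURCE B (Python) =====
-- _MEDICAL_TERMS = ('diabetes hypertension pneumonia sepsis infection '
--                   'syndrome disease disorder condition mg ml '
--                   'positive negative normal abnormal surgery biopsy').split()
--
--
-- def _build_trie():
--     """Prefix tree over all terms; '' marks a node where a term ends."""
--     root = {}
--     for term in _MEDICAL_TERMS:
--         node = root
--         for ch in term:
--             node = node.setdefault(ch, {})
--         node[''] = True
--     return root
--
--
-- _TRIE = _build_trie()
--
--
-- def _looks_like_medical_concept(value: str) -> bool:
--     """Check if a value looks like a medical concept (shared-prefix trie scan)."""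
--     value = str(value).strip().lower()
--
--     if len(value) < 3 or value.isdigit():
--         return False
--
--     n = len(value)
--     for start in range(n):
--         node = _TRIE
--         j = start
--         while True:
--             if '' in node:
--                 return True
--             if j == n or value[j] not in node:
--                 break
--             node = node[value[j]]
--             j += 1
--     return False
-- ===== Notes on version B (the rewrite author's own statement) =====
-- stated objective: alternative
-- what changed: Replaces the 17 independent substring membership passes with a prefix tree (trie) built once from all terms and a single scan that descends the trie at each position, matching all patterns simultaneously with shared prefixes.
import Mathlib
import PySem

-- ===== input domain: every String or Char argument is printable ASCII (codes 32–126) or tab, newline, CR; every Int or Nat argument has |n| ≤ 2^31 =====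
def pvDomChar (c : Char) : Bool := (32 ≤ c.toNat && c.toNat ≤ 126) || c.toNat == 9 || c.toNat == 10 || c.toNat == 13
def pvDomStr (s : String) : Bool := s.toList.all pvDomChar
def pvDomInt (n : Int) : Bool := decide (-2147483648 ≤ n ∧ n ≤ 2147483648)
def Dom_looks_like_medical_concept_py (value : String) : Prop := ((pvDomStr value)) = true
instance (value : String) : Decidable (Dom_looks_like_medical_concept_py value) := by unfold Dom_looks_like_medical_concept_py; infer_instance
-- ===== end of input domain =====

-- B replaces A's 17 independent substring membership passes with a prefix tree (trie)
-- built once from the terms and one scan that descends it at each position, matching all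
-- patterns simultaneously with shared prefixes (objective: alternative).


-- ===== PORT A =====
-- medical_terms, as lists of code points
def pvTermsA : List (List Char) :=
  ["diabetes".toList, "hypertension".toList, "pneumonia".toList, "sepsis".toList, "infection".toList,
   "syndrome".toList, "disease".toList, "disorder".toList, "condition".toList, "mg".toList, "ml".toList,
   "positive".toList, "negative".toList, "normal".toList, "abnormal".toList, "surgery".toList, "biopsy".toList]

def looks_like_medical_concept_py (value : String) : Bool :=
  let v := PySem.Chars.lower (PySem.Chars.strip value.toList)
  if v.isEmpty || decide (v.length < 3) || PySem.Chars.strIsdigit v then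
    false
  else
    pvTermsA.any (fun term => PySem.Chars.isIn term v)

-- ===== PORT B =====
def pvTermsB : List (List Char) :=
  (PySem.Chars.split₀
    ("diabetes hypertension pneumonia sepsis infection syndrome disease disorder condition mg ml positive negative normal abnormal surgery biopsy".toList))

-- the trie (Source B's dict-of-dicts) as a flat node table; node = (children assoc list, terminal flag)
def pvGetNode (tbl : List ((List (Char × Nat)) × Bool)) (i : Nat) : (List (Char × Nat)) × Bool :=
  tbl.getD i ([], false)

def pvModifyNode (tbl : List ((List (Char × Nat)) × Bool)) (i : Nat)
    (f : (List (Char × Nat)) × Bool → (List (Char × Nat)) × Bool) : List ((List (Char × Nat)) × Bool) :=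
  match tbl, i with
  | [], _ => []
  | x :: xs, 0 => f x :: xs
  | x :: xs, Nat.succ k => x :: pvModifyNode xs k f

-- node.setdefault walk of _build_trie, one term at a time; fresh nodes are appended at the end
def pvInsertTerm (tbl : List ((List (Char × Nat)) × Bool)) (i : Nat) :
    List Char → List ((List (Char × Nat)) × Bool)
  | [] => pvModifyNode tbl i (fun nd => (nd.1, true))     -- node[''] = True
  | c :: r =>
    match (pvGetNode tbl i).1.lookup c with
    | some j => pvInsertTerm tbl j r
    | none =>
      pvInsertTerm (pvModifyNode tbl i (fun nd => (nd.1 ++ [(c, tbl.length)], nd.2)) ++ [([], false)])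
        tbl.length r

def pvTrie : List ((List (Char × Nat)) × Bool) :=
  pvTermsB.foldl (fun tbl t => pvInsertTerm tbl 0 t) [([], false)]

-- the inner while loop: check terminal, then follow the child edge for the next char
def pvDescend (tbl : List ((List (Char × Nat)) × Bool)) (i : Nat) : List Char → Bool
  | [] => (pvGetNode tbl i).2
  | c :: r =>
    (pvGetNode tbl i).2 ||
      (match (pvGetNode tbl i).1.lookup c with
       | some j => pvDescend tbl j r
       | none => false)

-- the outer 'for start in range(n)' loop over start positions
def pvScanTrie (tbl : List ((List (Char × Nat)) × Bool)) : List Char → Bool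
  | [] => false
  | c :: r => pvDescend tbl 0 (c :: r) || pvScanTrie tbl r

def looks_like_medical_concept_py_alt (value : String) : Bool :=
  let v := PySem.Chars.lower (PySem.Chars.strip value.toList)
  if decide (v.length < 3) || PySem.Chars.strIsdigit v then
    false
  else
    pvScanTrie pvTrie v

-- ===== PRECONDITION & SPEC =====
def Spec_looks_like_medical_concept_py (value : String) (out : Bool) : Prop := out = looks_like_medical_concept_py_alt value
instance (value : String) (out : Bool) : Decidable (Spec_looks_like_medical_concept_py value out) := by unfold Spec_looks_like_medical_concept_py; infer_instance

-- ===== CLAIM (what is proved, stated in full; the proofs are below) =====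
def Claim_equal_looks_like_medical_concept_py : Prop := ∀ (value : String), Dom_looks_like_medical_concept_py value → Spec_looks_like_medical_concept_py value (looks_like_medical_concept_py value)

-- ===== LEMMAS AND PROOFS =====

-- words accepted from node i using at most `fuel` edges
def pvLang (tbl : List ((List (Char × Nat)) × Bool)) : Nat → Nat → List (List Char)
  | 0, i => if (pvGetNode tbl i).2 then [[]] else []
  | f+1, i =>
    (if (pvGetNode tbl i).2 then [[]] else []) ++
      (pvGetNode tbl i).1.flatMap (fun p => (pvLang tbl f p.2).map (p.1 :: ·))

theorem pv_bool_ext (a b : Bool) (h : a = true ↔ b = true) : a = b := by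
  cases a <;> cases b <;> simp_all

theorem pv_any_ext {α : Type} (l : List α) (f g : α → Bool) (h : ∀ a, f a = g a) : l.any f = l.any g :=
  congrArg l.any (funext h)

theorem pv_any_not_mem (l : List (Char × Nat)) (c : Char) (g : Nat → Bool)
    (h : c ∉ l.map Prod.fst) : (l.any (fun p => p.1 == c && g p.2)) = false := by
  simp only [List.any_eq_false]
  rintro ⟨c', j⟩ hm
  have : c' ≠ c := fun e => h (by simpa [e] using List.mem_map_of_mem (f := Prod.fst) hm)
  simp [this]

theorem pv_lookup_any (l : List (Char × Nat)) (c : Char) (g : Nat → Bool)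
    (h : (l.map Prod.fst).Nodup) :
    (l.any (fun p => p.1 == c && g p.2)) =
      (match l.lookup c with | some j => g j | none => false) := by
  induction l with
  | nil => simp [List.lookup]
  | cons x xs ih =>
    simp only [List.map, List.nodup_cons] at h
    by_cases hc : x.1 = c
    · have hrest : (xs.any (fun p => p.1 == c && g p.2)) = false :=
        pv_any_not_mem xs c g (by rw [← hc]; exact h.1)
      simp [List.lookup, List.any_cons, hc, hrest]
    · have h1 : (x.1 == c) = false := by simp [hc]
      have h2 : (c == x.1) = false := by simp; exact fun e => hc e.symm
      simp [List.lookup, List.any_cons, h1, h2, ih h.2]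

theorem pvLang_len (tbl : List ((List (Char × Nat)) × Bool)) :
    ∀ f i t, t ∈ pvLang tbl f i → t.length ≤ f := by
  intro f
  induction f with
  | zero => intro i t h; simp [pvLang] at h; rcases h with ⟨-, rfl⟩; simp
  | succ n ih =>
    intro i t h
    simp only [pvLang, List.mem_append, List.mem_flatMap, List.mem_map] at h
    rcases h with h | ⟨p, _, w, hw, rfl⟩
    · rcases (by split at h <;> simp_all : t = []) with rfl; simp
    · simpa using Nat.succ_le_succ (ih p.2 w hw)

theorem pvLang_downto (tbl : List ((List (Char × Nat)) × Bool)) :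
    ∀ t f g i, t ∈ pvLang tbl g i → t.length ≤ f → t ∈ pvLang tbl f i := by
  intro t
  induction t with
  | nil =>
    intro f g i hm _
    have hacc : (pvGetNode tbl i).2 = true := by
      cases g with
      | zero => simp only [pvLang] at hm; split at hm <;> simp_all
      | succ g' =>
        simp only [pvLang, List.mem_append, List.mem_flatMap, List.mem_map] at hm
        rcases hm with hm | ⟨p, _, w, _, hw⟩
        · split at hm <;> simp_all
        · simp at hw
    cases f <;> simp [pvLang, hacc]
  | cons c w ih =>
    intro f g i hm hlen
    cases g with
    | zero => simp only [pvLang] at hm; split at hm <;> simp_all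
    | succ g' =>
      simp only [pvLang, List.mem_append, List.mem_flatMap, List.mem_map] at hm
      rcases hm with hm | ⟨p, hp, w', hw', heq⟩
      · split at hm <;> simp_all
      · have hpair := List.cons_eq_cons.mp heq
        cases f with
        | zero => simp at hlen
        | succ f' =>
          have hmem : w ∈ pvLang tbl f' p.2 :=
            ih f' g' p.2 (hpair.2 ▸ hw') (by simpa using hlen)
          simp only [pvLang, List.mem_append, List.mem_flatMap, List.mem_map]
          exact Or.inr ⟨p, hp, w, hmem, by rw [hpair.1]⟩

theorem pvDescend_eq (tbl : List ((List (Char × Nat)) × Bool))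
    (hnd : ∀ i, ((pvGetNode tbl i).1.map Prod.fst).Nodup) :
    ∀ s i, pvDescend tbl i s = (pvLang tbl s.length i).any (fun t => t.isPrefixOf s) := by
  intro s
  induction s with
  | nil =>
    intro i
    simp only [pvDescend, List.length_nil, pvLang]
    cases h : (pvGetNode tbl i).2 <;> simp
  | cons c r ih =>
    intro i
    have hchild : ∀ p : Char × Nat,
        (((pvLang tbl r.length p.2).map (p.1 :: ·)).any (fun t => t.isPrefixOf (c :: r)))
          = ((p.1 == c) && pvDescend tbl p.2 r) := by
      intro p
      cases hpc : (p.1 == c) with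
      | false => simp [List.any_map, Function.comp_def, List.isPrefixOf, hpc]
      | true => simp [List.any_map, Function.comp_def, List.isPrefixOf, hpc, ih p.2]
    have hL : pvDescend tbl i (c :: r)
        = ((pvGetNode tbl i).2 || ((pvGetNode tbl i).1.any (fun p => p.1 == c && pvDescend tbl p.2 r))) := by
      have h := pv_lookup_any (pvGetNode tbl i).1 c (fun j => pvDescend tbl j r) (hnd i)
      calc pvDescend tbl i (c :: r)
          = ((pvGetNode tbl i).2 ||
              (match (pvGetNode tbl i).1.lookup c with
               | some j => pvDescend tbl j r
               | none => false)) := rfl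
        _ = _ := by rw [← h]
    have hbase : ((if (pvGetNode tbl i).2 = true then [[]] else ([] : List (List Char))).any
        (fun t => t.isPrefixOf (c :: r))) = (pvGetNode tbl i).2 := by
      cases h : (pvGetNode tbl i).2 <;> simp [List.isPrefixOf]
    have hflat : (((pvGetNode tbl i).1.flatMap (fun p => (pvLang tbl r.length p.2).map (p.1 :: ·))).any
        (fun t => t.isPrefixOf (c :: r)))
        = ((pvGetNode tbl i).1.any (fun p => p.1 == c && pvDescend tbl p.2 r)) := by
      rw [List.any_flatMap]
      exact pv_any_ext _ _ _ hchild
    simp only [List.length_cons, pvLang, List.any_append, hbase, hflat, hL]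

theorem pvLang_out (tbl : List ((List (Char × Nat)) × Bool)) (i : Nat)
    (h : tbl.length ≤ i) : ∀ f, pvLang tbl f i = [] := by
  have hget : pvGetNode tbl i = ([], false) := by
    simp [pvGetNode, List.getD_eq_getElem?_getD, List.getElem?_eq_none h]
  intro f; cases f <;> simp [pvLang, hget]

-- the concrete trie: child keys are distinct at every node
set_option maxRecDepth 40000 in
theorem pvTrie_nodup : ∀ i, ((pvGetNode pvTrie i).1.map Prod.fst).Nodup := by
  intro i
  by_cases h : i < pvTrie.length
  · revert h
    have : ∀ i ∈ List.range pvTrie.length, ((pvGetNode pvTrie i).1.map Prod.fst).Nodup := by decide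
    intro h
    exact this i (List.mem_range.mpr h)
  · rw [(by simp [pvGetNode, List.getD_eq_getElem?_getD, List.getElem?_eq_none (Nat.le_of_not_lt h)] :
        pvGetNode pvTrie i = ([], false))]
    simp

-- the concrete trie has no path longer than 12 edges: the languages stabilise at fuel 12
set_option maxRecDepth 40000 in
theorem pvTrie_h13 : ∀ i, pvLang pvTrie 13 i = pvLang pvTrie 12 i := by
  intro i
  by_cases h : i < pvTrie.length
  · have : ∀ i ∈ List.range pvTrie.length, pvLang pvTrie 13 i = pvLang pvTrie 12 i := by decide
    exact this i (List.mem_range.mpr h)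
  · rw [pvLang_out pvTrie i (Nat.le_of_not_lt h), pvLang_out pvTrie i (Nat.le_of_not_lt h)]

theorem pvLang_stab : ∀ n, 12 ≤ n → ∀ i, pvLang pvTrie n i = pvLang pvTrie 12 i := by
  intro n
  induction n with
  | zero => omega
  | succ m ih =>
    intro hm i
    rcases Nat.lt_or_ge m 12 with hlt | hge
    · have : m + 1 = 12 := by omega
      rw [this]
    · have hfun : (fun p : Char × Nat => (pvLang pvTrie m p.2).map (p.1 :: ·))
          = (fun p : Char × Nat => (pvLang pvTrie 12 p.2).map (p.1 :: ·)) :=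
        funext (fun p => by rw [ih hge p.2])
      calc pvLang pvTrie (m+1) i
          = (if (pvGetNode pvTrie i).2 then [[]] else []) ++
              (pvGetNode pvTrie i).1.flatMap (fun p => (pvLang pvTrie m p.2).map (p.1 :: ·)) := rfl
        _ = (if (pvGetNode pvTrie i).2 then [[]] else []) ++
              (pvGetNode pvTrie i).1.flatMap (fun p => (pvLang pvTrie 12 p.2).map (p.1 :: ·)) := by
            rw [hfun]
        _ = pvLang pvTrie 13 i := rfl
        _ = pvLang pvTrie 12 i := pvTrie_h13 i

-- the language of the root at fuel 12 is exactly the term list (as a set)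
set_option maxRecDepth 40000 in
theorem pvTrie_lang_sub : ∀ t ∈ pvLang pvTrie 12 0, t ∈ pvTermsB := by decide
set_option maxRecDepth 40000 in
theorem pvTrie_terms_sub : ∀ t ∈ pvTermsB, t ∈ pvLang pvTrie 12 0 := by decide
theorem pvDescend_root_iff (s : List Char) :
    pvDescend pvTrie 0 s = true ↔ ∃ t ∈ pvTermsB, t <+: s := by
  rw [pvDescend_eq pvTrie pvTrie_nodup]
  simp only [List.any_eq_true, List.isPrefixOf_iff_prefix]
  constructor
  · rintro ⟨t, hm, hp⟩
    refine ⟨t, ?_, hp⟩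
    by_cases hle : s.length ≤ 12
    · exact pvTrie_lang_sub t
        (pvLang_downto pvTrie t 12 s.length 0 hm (le_trans (pvLang_len pvTrie _ _ _ hm) hle))
    · exact pvTrie_lang_sub t (by rwa [pvLang_stab s.length (by omega) 0] at hm)
  · rintro ⟨t, hm, hp⟩
    have h12 : t ∈ pvLang pvTrie 12 0 := pvTrie_terms_sub t hm
    exact ⟨t, pvLang_downto pvTrie t s.length 12 0 h12 hp.length_le, hp⟩

set_option maxRecDepth 40000 in
theorem pvScanTrie_iff (s : List Char) :
    pvScanTrie pvTrie s = true ↔ ∃ t ∈ pvTermsB, t <:+: s := by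
  induction s with
  | nil => simp [pvScanTrie]; decide
  | cons c rest ih =>
    simp only [pvScanTrie, Bool.or_eq_true, pvDescend_root_iff, ih]
    constructor
    · rintro (⟨t, ht, hp⟩ | ⟨t, ht, hi⟩)
      · exact ⟨t, ht, hp.isInfix⟩
      · exact ⟨t, ht, List.infix_cons_iff.mpr (Or.inr hi)⟩
    · rintro ⟨t, ht, hi⟩
      rcases (List.infix_cons_iff.mp hi) with hp | hi'
      · exact Or.inl ⟨t, ht, hp⟩
      · exact Or.inr ⟨t, ht, hi'⟩

set_option maxRecDepth 40000 in
theorem looks_like_medical_concept_py_eq (value : String) :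
    looks_like_medical_concept_py value = looks_like_medical_concept_py_alt value := by
  simp only [looks_like_medical_concept_py, looks_like_medical_concept_py_alt]
  set v := PySem.Chars.lower (PySem.Chars.strip value.toList) with hv
  have hg : (v.isEmpty || decide (v.length < 3) || PySem.Chars.strIsdigit v)
      = (decide (v.length < 3) || PySem.Chars.strIsdigit v) := by
    cases he : v.isEmpty with
    | false => simp
    | true =>
      have hlen : v.length < 3 := by rw [List.isEmpty_iff] at he; simp [he]
      simp [hlen]
  rw [hg]
  split
  · rfl
  · apply pv_bool_ext
    rw [pvScanTrie_iff]
    simp only [List.any_eq_true]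
    constructor
    · rintro ⟨t, ht, hin⟩
      exact ⟨t, ht, (PySem.Chars.isIn_iff_infix t v).mp hin⟩
    · rintro ⟨t, ht, hinf⟩
      exact ⟨t, ht, (PySem.Chars.isIn_iff_infix t v).mpr hinf⟩

-- ===== VERDICT (by name: the statement is the Claim_ definition above) =====
theorem looks_like_medical_concept_py_spec : Claim_equal_looks_like_medical_concept_py := by
  intro value _
  unfold Spec_looks_like_medical_concept_py
  exact looks_like_medical_concept_py_eq value
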